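-- pv_equiv track=rewrite | github.com/usf-ai-org/usf-bios | usf_bios/pipelines/webui/train_ui.py | detect_training_type
-- ===== SOURCE A (Python) =====
-- def detect_training_type(tb_metrics: dict) -> str:
--     """Detect training type from TensorBoard metrics."""
--     metric_keys = set(tb_metrics.keys())
--
--     # Check for RLHF indicators
--     if any('reward' in k.lower() and 'chosen' in k.lower() for k in metric_keys):
--         return 'dpo'
--     if any('policy_loss' in k.lower() for k in metric_keys):
--         return 'ppo'
--     if any(k.lower() in ['reward', 'kl'] for k in metric_keys):
--         return 'grpo'
--     if any('perplexity' in k.lower() for k in metric_keys):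
--         return 'pt'
--
--     return 'sft'
-- ===== SOURCE B (Python) =====
-- _LABELS = ('dpo', 'ppo', 'grpo', 'pt', 'sft')
--
--
-- def _rank(k: str) -> int:
--     """Priority rank of the single key k (0 = strongest indicator, 4 = none)."""
--     lk = k.lower()
--     if 'reward' in lk and 'chosen' in lk:
--         return 0
--     if 'policy_loss' in lk:
--         return 1
--     if lk in ('reward', 'kl'):
--         return 2
--     if 'perplexity' in lk:
--         return 3
--     return 4
--
--
-- def detect_training_type(tb_metrics: dict) -> str:
--     """Detect training type from TensorBoard metrics."""
--     return _LABELS[min(map(_rank, tb_metrics.keys()), default=4)]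
-- ===== Notes on version B (the rewrite author's own statement) =====
-- stated objective: alternative
-- what changed: B replaces A's four global any-scans and return ladder by a per-key numeric classifier: each key is mapped once to a priority rank 0-4, the minimum rank over all keys is taken, and the result is a table lookup into the label tuple.
import Mathlib
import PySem

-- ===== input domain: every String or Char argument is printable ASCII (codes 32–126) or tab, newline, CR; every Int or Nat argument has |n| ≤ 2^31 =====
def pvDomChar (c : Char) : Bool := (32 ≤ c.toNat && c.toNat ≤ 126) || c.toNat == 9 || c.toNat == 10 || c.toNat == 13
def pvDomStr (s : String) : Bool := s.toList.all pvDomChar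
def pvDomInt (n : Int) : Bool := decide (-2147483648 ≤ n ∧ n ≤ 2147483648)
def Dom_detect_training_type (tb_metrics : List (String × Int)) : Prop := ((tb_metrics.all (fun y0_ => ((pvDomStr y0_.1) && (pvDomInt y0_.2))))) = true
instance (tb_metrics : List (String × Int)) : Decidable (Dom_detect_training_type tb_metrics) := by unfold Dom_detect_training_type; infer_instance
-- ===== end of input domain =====

-- B classifies each key to a numeric priority rank (0..4) and indexes a label table by the minimum rank, instead of A's four global any-scans with a return ladder; same values on every input.


-- ===== PORT A =====
def detect_training_type (tb_metrics : List (String × Int)) : String :=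
  let metric_keys := PySem.Set.ofList (tb_metrics.map Prod.fst)
  if metric_keys.any (fun k => PySem.Str.isIn "reward" (PySem.Str.lower k) && PySem.Str.isIn "chosen" (PySem.Str.lower k)) then "dpo"
  else if metric_keys.any (fun k => PySem.Str.isIn "policy_loss" (PySem.Str.lower k)) then "ppo"
  else if metric_keys.any (fun k => (["reward", "kl"] : List String).contains (PySem.Str.lower k)) then "grpo"
  else if metric_keys.any (fun k => PySem.Str.isIn "perplexity" (PySem.Str.lower k)) then "pt"
  else "sft"

-- ===== PORT B =====
def pvLabels : List String := ["dpo", "ppo", "grpo", "pt", "sft"]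

def pvRank (k : String) : Nat :=
  let lk := PySem.Str.lower k
  if PySem.Str.isIn "reward" lk && PySem.Str.isIn "chosen" lk then 0
  else if PySem.Str.isIn "policy_loss" lk then 1
  else if (["reward", "kl"] : List String).contains lk then 2
  else if PySem.Str.isIn "perplexity" lk then 3
  else 4

def detect_training_type_alt (tb_metrics : List (String × Int)) : String :=
  pvLabels.getD (((tb_metrics.map Prod.fst).map pvRank).foldl min 4) "sft"

-- ===== PRECONDITION & SPEC =====
def Spec_detect_training_type (tb_metrics : List (String × Int)) (out : String) : Prop := out = detect_training_type_alt tb_metrics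
instance (tb_metrics : List (String × Int)) (out : String) : Decidable (Spec_detect_training_type tb_metrics out) := by unfold Spec_detect_training_type; infer_instance

-- ===== CLAIM (what is proved, stated in full; the proofs are below) =====
def Claim_equal_detect_training_type : Prop := ∀ (tb_metrics : List (String × Int)), Dom_detect_training_type tb_metrics → Spec_detect_training_type tb_metrics (detect_training_type tb_metrics)

-- ===== LEMMAS AND PROOFS =====

-- any over set(keys) equals any over the keys list (membership is preserved by dedup)
theorem any_ofList (l : List String) (p : String → Bool) :
    (PySem.Set.ofList l).any p = l.any p := by
  rw [Bool.eq_iff_iff]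
  simp [List.any_eq_true, PySem.Set.mem_ofList]

-- foldl of min commutes with a min in the accumulator
theorem foldl_min_acc (l : List Nat) : ∀ (a b : Nat), l.foldl min (a.min b) = a.min (l.foldl min b) := by
  induction l with
  | nil => intro a b; rfl
  | cons y ys ihy =>
    intro a b
    simp only [List.foldl_cons]
    rw [min_assoc, ihy]

-- min of two priority ladders is the ladder of the disjunctions
theorem min_ladder (b0 b1 b2 b3 a0 a1 a2 a3 : Bool) :
    min (if b0 then 0 else if b1 then 1 else if b2 then 2 else if b3 then 3 else 4)
            (if a0 then 0 else if a1 then 1 else if a2 then 2 else if a3 then 3 else 4)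
    = (if (b0 || a0) then 0 else if (b1 || a1) then 1 else if (b2 || a2) then 2
       else if (b3 || a3) then 3 else 4) := by
  cases b0 <;> cases b1 <;> cases b2 <;> cases b3 <;> cases a0 <;> cases a1 <;> cases a2 <;> cases a3 <;> rfl

-- the minimum per-key rank equals A's priority ladder over 'any'-scans
theorem min_rank_ladder (ks : List String) :
    (ks.map pvRank).foldl min 4 =
      (if ks.any (fun k => PySem.Str.isIn "reward" (PySem.Str.lower k) && PySem.Str.isIn "chosen" (PySem.Str.lower k)) then 0
       else if ks.any (fun k => PySem.Str.isIn "policy_loss" (PySem.Str.lower k)) then 1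
       else if ks.any (fun k => (["reward", "kl"] : List String).contains (PySem.Str.lower k)) then 2
       else if ks.any (fun k => PySem.Str.isIn "perplexity" (PySem.Str.lower k)) then 3
       else 4) := by
  induction ks with
  | nil => simp
  | cons x xs ih =>
    simp only [List.map_cons, List.foldl_cons, List.any_cons]
    rw [min_comm 4 (pvRank x), foldl_min_acc, ih]
    simp only [pvRank]
    exact min_ladder _ _ _ _ _ _ _ _

-- ===== VERDICT (by name: the statement is the Claim_ definition above) =====
theorem detect_training_type_spec : Claim_equal_detect_training_type := by
  intro tb _
  unfold Spec_detect_training_type detect_training_type detect_training_type_alt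
  simp only [any_ofList, min_rank_ladder]
  split_ifs <;> rfl
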